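-- pv_equiv track=rewrite | github.com/joaonahmias/GestaoDeQualidadeDeSoftware | Exercicio1_QGS/Plantao.py | Plantao
-- ===== SOURCE A (Python) =====
-- def Plantao(lista_medico_hora):
--     if(len(lista_medico_hora)==0):
--         return[]
--     else:
--         resultado=[]
--         plantaomaislongo = lista_medico_hora[0][1]
--         for plantao in lista_medico_hora:
--             if plantao[1]==plantaomaislongo:
--                 resultado.append(plantao)
--             elif plantao[1] > plantaomaislongo:
--                 resultado=[]
--                 resultado.append(plantao)
--                 plantaomaislongo = plantao[1]
--
--     return resultado
-- ===== SOURCE B (Python) =====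
-- def Plantao(lista_medico_hora):
--     if not lista_medico_hora:
--         return []
--     m = max(rec[1] for rec in lista_medico_hora)
--     return [rec for rec in lista_medico_hora if rec[1] == m]
-- ===== Notes on version B (the rewrite author's own statement) =====
-- stated objective: simpler
-- what changed: Replaced A's single adaptive pass that resets and rebuilds the accumulator each time a new maximum appears with a compute-max-then-filter decomposition: one pass for the maximum duration, one comprehension keeping the tied records.
import Mathlib
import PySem

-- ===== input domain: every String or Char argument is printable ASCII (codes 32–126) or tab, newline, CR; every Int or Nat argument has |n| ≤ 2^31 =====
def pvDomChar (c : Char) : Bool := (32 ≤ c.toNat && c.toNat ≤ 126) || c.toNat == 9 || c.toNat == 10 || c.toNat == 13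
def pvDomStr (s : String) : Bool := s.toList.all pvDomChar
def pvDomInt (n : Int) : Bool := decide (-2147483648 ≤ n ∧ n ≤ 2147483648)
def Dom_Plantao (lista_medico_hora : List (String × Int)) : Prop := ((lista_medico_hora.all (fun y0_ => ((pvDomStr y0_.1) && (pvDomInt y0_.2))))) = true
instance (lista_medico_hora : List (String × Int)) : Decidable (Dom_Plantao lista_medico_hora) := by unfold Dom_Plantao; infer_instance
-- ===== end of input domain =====

-- B replaces A's adaptive single pass (accumulator reset on each new maximum) by
-- compute-the-maximum-then-filter, two plain passes; objective: simpler.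

-- ===== PORT A =====
-- A's for-loop over the records with state (resultado, plantaomaislongo)
def PlantaoLoop (rest : List (String × Int)) (resultado : List (String × Int))
    (plantaomaislongo : Int) : List (String × Int) :=
  match rest with
  | [] => resultado
  | p :: r =>
    if p.2 = plantaomaislongo then
      PlantaoLoop r (resultado ++ [p]) plantaomaislongo
    else if p.2 > plantaomaislongo then
      PlantaoLoop r [p] p.2
    else
      PlantaoLoop r resultado plantaomaislongo

def Plantao (lista_medico_hora : List (String × Int)) : List (String × Int) :=
  match lista_medico_hora with
  | [] => []
  | h :: _ => PlantaoLoop lista_medico_hora [] h.2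

-- ===== PORT B =====
def Plantao_alt (lista_medico_hora : List (String × Int)) : List (String × Int) :=
  match lista_medico_hora with
  | [] => []
  | h :: t =>
    -- m = max(rec[1] for rec in lista_medico_hora)  (max over a nonempty list)
    let m : Int := (t.map (fun rec => rec.2)).foldl max h.2
    lista_medico_hora.filter (fun rec => rec.2 == m)

-- ===== PRECONDITION & SPEC =====
def Spec_Plantao (lista_medico_hora : List (String × Int)) (out : List (String × Int)) : Prop := out = Plantao_alt lista_medico_hora
instance (lista_medico_hora : List (String × Int)) (out : List (String × Int)) : Decidable (Spec_Plantao lista_medico_hora out) := by unfold Spec_Plantao; infer_instance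

-- ===== CLAIM (what is proved, stated in full; the proofs are below) =====
def Claim_equal_Plantao : Prop := ∀ (lista_medico_hora : List (String × Int)), Dom_Plantao lista_medico_hora → Spec_Plantao lista_medico_hora (Plantao lista_medico_hora)

-- ===== LEMMAS AND PROOFS =====

lemma le_foldl_max (l : List Int) (b : Int) : b ≤ l.foldl max b := by
  induction l generalizing b with
  | nil => simp
  | cons x r ih => exact le_trans (le_max_left b x) (ih (max b x))

-- loop invariant: the loop's value is all records of `rest` tied for the running
-- maximum m, prefixed by `resultado` exactly when no strictly larger hour appears.
lemma PlantaoLoop_eq (rest : List (String × Int)) (resultado : List (String × Int))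
    (best : Int) :
    PlantaoLoop rest resultado best =
      (if (rest.map (fun rec => rec.2)).foldl max best = best then resultado else []) ++
        rest.filter (fun rec => rec.2 == (rest.map (fun rec => rec.2)).foldl max best) := by
  induction rest generalizing resultado best with
  | nil => simp [PlantaoLoop]
  | cons p r ih =>
    simp only [PlantaoLoop, List.map_cons, List.foldl_cons]
    rcases lt_trichotomy p.2 best with h | h | h
    · rw [if_neg (by omega), if_neg (by omega), ih]
      have hm : max best p.2 = best := by omega
      have hlt : p.2 < (r.map (fun rec => rec.2)).foldl max best :=
        lt_of_lt_of_le h (le_foldl_max _ _)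
      simp only [hm]
      have hne : (p.2 == (r.map (fun rec => rec.2)).foldl max best) = false := by
        simp; omega
      simp [List.filter_cons, hne]
    · rw [if_pos h, ih]
      have hm : max best p.2 = best := by omega
      simp only [hm]
      by_cases hb : (r.map (fun rec => rec.2)).foldl max best = best
      · simp [hb, List.filter_cons, h]
      · simp only [if_neg hb]
        have : ¬ p.2 = (r.map (fun rec => rec.2)).foldl max best := by omega
        simp [List.filter_cons, this]
    · rw [if_neg (by omega), if_pos h, ih]
      have hm : max best p.2 = p.2 := by omega
      have hge : p.2 ≤ (r.map (fun rec => rec.2)).foldl max p.2 := le_foldl_max _ _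
      simp only [hm]
      have hnb : ¬ (r.map (fun rec => rec.2)).foldl max p.2 = best := by omega
      rw [if_neg hnb]
      by_cases he : (r.map (fun rec => rec.2)).foldl max p.2 = p.2
      · simp [he, List.filter_cons]
      · simp [List.filter_cons, he]; omega

-- ===== VERDICT (by name: the statement is the Claim_ definition above) =====
theorem Plantao_spec : Claim_equal_Plantao := by
  intro xs _
  unfold Spec_Plantao Plantao Plantao_alt
  cases xs with
  | nil => rfl
  | cons h t =>
    simp only [PlantaoLoop_eq, List.map_cons, List.foldl_cons, max_self]
    simp
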